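-- pv_equiv track=rewrite | github.com/Dex102/Python_seminars | seminar_5/z3.py | numbers_langs
-- ===== SOURCE A (Python) =====
-- def numbers_langs(number):
--     result = []
--     sum = 0
--
--     for i, j in number:
--         for l in j:
--             sum += ord(l)
--         if sum % i == 0:
--             result.append((sum, j))
--     return result
-- ===== SOURCE B (Python) =====
-- def numbers_langs(number):
--     number = list(number)
--     # pass 1: per-string ord-sums, then running cumulative totals
--     totals = []
--     c = 0
--     for s in [sum(map(ord, j)) for _, j in number]:
--         c += s
--         totals.append(c)
--     # pass 2: select the pairs whose cumulative total is divisible by i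
--     return [(c, j) for c, (i, j) in zip(totals, number) if c % i == 0]
-- ===== Notes on version B (the rewrite author's own statement) =====
-- stated objective: alternative
-- what changed: A's single interleaved loop (running char-code sum updated while filtering) is split into two differently-shaped passes: first a list of per-string ord-sums turned into cumulative totals, then a zip-and-filter pass selecting the divisible ones.
import Mathlib
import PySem

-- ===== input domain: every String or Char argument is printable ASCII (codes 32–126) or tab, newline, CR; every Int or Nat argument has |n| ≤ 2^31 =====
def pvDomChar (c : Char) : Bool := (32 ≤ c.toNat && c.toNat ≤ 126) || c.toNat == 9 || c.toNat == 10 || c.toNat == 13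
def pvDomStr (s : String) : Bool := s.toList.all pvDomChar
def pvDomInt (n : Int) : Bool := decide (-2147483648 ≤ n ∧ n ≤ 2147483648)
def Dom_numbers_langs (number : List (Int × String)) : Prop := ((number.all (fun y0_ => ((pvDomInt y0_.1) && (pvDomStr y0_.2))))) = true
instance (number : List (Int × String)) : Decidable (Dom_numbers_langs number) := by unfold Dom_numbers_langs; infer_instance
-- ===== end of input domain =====

-- B splits A's single interleaved loop into two passes (cumulative ord-sums, then zip-and-filter); objective: alternative decomposition, same cost.

-- ===== PORT A =====
def numbers_langs (number : List (Int × String)) : List (Int × String) :=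
  (number.foldl (fun (st : List (Int × String) × Int) ij =>
      let s := ij.2.toList.foldl (fun acc l => acc + (l.toNat : Int)) st.2
      if PySem.Int.mod s ij.1 = 0 then (st.1 ++ [(s, ij.2)], s) else (st.1, s))
    ([], 0)).1

-- ===== PORT B =====
def numbers_langs_alt (number : List (Int × String)) : List (Int × String) :=
  let sums := number.map (fun ij => (ij.2.toList.map (fun l => (l.toNat : Int))).sum)
  let totals := (sums.foldl (fun (st : List Int × Int) s => (st.1 ++ [st.2 + s], st.2 + s)) ([], 0)).1
  (totals.zip number).filterMap (fun p => if PySem.Int.mod p.1 p.2.1 = 0 then some (p.1, p.2.2) else none)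

-- ===== PRECONDITION & SPEC =====
-- Pre_ excludes lists containing a pair with i = 0, on which Python's `sum % i` raises ZeroDivisionError (in A and in B alike).
def Pre_numbers_langs (number : List (Int × String)) : Prop :=
  ∀ p ∈ number, p.1 ≠ 0
instance (number : List (Int × String)) : Decidable (Pre_numbers_langs number) := by
  unfold Pre_numbers_langs; infer_instance
def pvWitness_numbers_langs : (List (Int × String)) := [(2, "ab"), (5, "x")]
def Spec_numbers_langs (number : List (Int × String)) (out : List (Int × String)) : Prop := out = numbers_langs_alt number
instance (number : List (Int × String)) (out : List (Int × String)) : Decidable (Spec_numbers_langs number out) := by unfold Spec_numbers_langs; infer_instance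

-- ===== CLAIM (what is proved, stated in full; the proofs are below) =====
def Claim_equal_numbers_langs : Prop := ∀ (number : List (Int × String)), Dom_numbers_langs number → Pre_numbers_langs number → Spec_numbers_langs number (numbers_langs number)

-- ===== LEMMAS AND PROOFS =====

-- cumulative totals of a list of increments starting from c (proof-only helper)
def pvCumul (c : Int) : List Int → List Int
  | [] => []
  | s :: t => (c + s) :: pvCumul (c + s) t

theorem pvOrdFold (l : List Char) (c : Int) :
    l.foldl (fun acc ch => acc + (ch.toNat : Int)) c = c + (l.map (fun ch => (ch.toNat : Int))).sum := by
  induction l generalizing c with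
  | nil => simp
  | cons h t ih => simp [List.foldl, ih]; ring

theorem pvB_totals (sums : List Int) (acc : List Int) (c : Int) :
    (sums.foldl (fun (st : List Int × Int) s => (st.1 ++ [st.2 + s], st.2 + s)) (acc, c)).1
      = acc ++ pvCumul c sums := by
  induction sums generalizing acc c with
  | nil => simp [pvCumul]
  | cons s t ih => simp [List.foldl, ih, pvCumul]

theorem pvA_fold (number : List (Int × String)) (acc : List (Int × String)) (c : Int) :
    (number.foldl (fun (st : List (Int × String) × Int) ij =>
        let s := ij.2.toList.foldl (fun acc l => acc + (l.toNat : Int)) st.2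
        if PySem.Int.mod s ij.1 = 0 then (st.1 ++ [(s, ij.2)], s) else (st.1, s))
      (acc, c)).1
      = acc ++ ((pvCumul c (number.map (fun ij => (ij.2.toList.map (fun l => (l.toNat : Int))).sum))).zip number).filterMap
          (fun p => if PySem.Int.mod p.1 p.2.1 = 0 then some (p.1, p.2.2) else none) := by
  induction number generalizing acc c with
  | nil => simp
  | cons h t ih =>
    simp only [List.foldl, List.map, pvCumul, List.zip_cons_cons, List.filterMap_cons]
    rw [pvOrdFold]
    by_cases hc : PySem.Int.mod (c + (h.2.toList.map (fun l => (l.toNat : Int))).sum) h.1 = 0 <;>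
      simp [hc, ih]

-- ===== VERDICT (by name: the statement is the Claim_ definition above) =====
theorem numbers_langs_spec : Claim_equal_numbers_langs := by
  intro number _ _
  unfold Spec_numbers_langs numbers_langs numbers_langs_alt
  rw [pvA_fold]
  simp only [pvB_totals, List.nil_append]
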